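-- pv_equiv track=rewrite | github.com/YJHeo01/BOJ | 소문난 칠공주 - 1941번.py | solution
-- ===== SOURCE A (Python) =====
-- from collections import deque
--
-- def solution(student,test_case):
--     if get_S_cnt(student, test_case) <= 3: return 0
--
--     area = [[False]*5 for _ in range(5)]
--
--     for x,y in test_case: area[x][y] = True
--
--     bfs(area,test_case[0])
--
--     for x,y in test_case:
--         if area[x][y] == True: return 0
--
--     return 1
--
-- def get_S_cnt(student,test_case):
--     ret_value = 0
--     for x,y in test_case:
--         if student[x][y] == 'S': ret_value += 1
--     return ret_value
--
-- def bfs(area,start):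
--     queue = deque([start])
--     area[start[0]][start[1]] = False
--     dx = [0,1,0,-1]
--     dy = [1,0,-1,0]
--     while queue:
--         vx,vy = queue.popleft()
--         for i in range(4):
--             nx = vx + dx[i]
--             ny = vy + dy[i]
--             if nx < 0 or ny < 0 or nx >= 5 or ny >= 5 or area[nx][ny] == False: continue
--             area[nx][ny] = False
--             queue.append((nx,ny))
-- ===== SOURCE B (Python) =====
-- def solution(student, test_case):
--     # count 'S' over the chosen cells; bail out before touching test_case[0]
--     s_cnt = 0
--     for x, y in test_case:
--         if student[x][y] == 'S':
--             s_cnt += 1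
--     if s_cnt <= 3:
--         return 0
--     # connectivity by set saturation: no 5x5 grid, no queue — repeatedly
--     # absorb every chosen cell adjacent to the reached set until fixpoint.
--     cells = list(dict.fromkeys(test_case))  # dedupe, keep first occurrences
--     dirs = ((0, 1), (1, 0), (0, -1), (-1, 0))
--     reached = [cells[0]]
--     for _ in range(len(cells)):
--         reached += [c for c in cells
--                     if c not in reached
--                     and any((c[0] + dx, c[1] + dy) in reached for dx, dy in dirs)]
--     return 1 if len(reached) == len(cells) else 0
-- ===== Notes on version B (the rewrite author's own statement) =====
-- stated objective: alternative
-- what changed: A paints the 7 cells onto a 5x5 boolean grid and flood-fills it with a deque BFS, then rescans the grid; B never builds a grid: it dedupes the chosen cells and decides connectivity by set saturation (repeatedly absorbing every chosen cell 4-adjacent to the reached set until a fixpoint), comparing reached size to cell count.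
import Mathlib
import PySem

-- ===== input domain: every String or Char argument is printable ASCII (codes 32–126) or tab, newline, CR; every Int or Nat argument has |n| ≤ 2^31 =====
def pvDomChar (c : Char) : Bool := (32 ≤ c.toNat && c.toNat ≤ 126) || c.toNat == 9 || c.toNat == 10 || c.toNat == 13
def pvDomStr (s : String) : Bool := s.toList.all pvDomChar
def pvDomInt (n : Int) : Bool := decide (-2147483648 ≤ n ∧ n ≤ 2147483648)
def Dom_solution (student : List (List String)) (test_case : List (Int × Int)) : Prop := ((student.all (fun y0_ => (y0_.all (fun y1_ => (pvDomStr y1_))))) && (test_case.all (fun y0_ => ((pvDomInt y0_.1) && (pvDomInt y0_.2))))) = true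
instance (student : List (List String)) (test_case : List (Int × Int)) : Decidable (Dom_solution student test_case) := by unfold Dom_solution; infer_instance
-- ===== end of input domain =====

-- B replaces A's 5x5-boolean-grid BFS (deque flood fill) by a set-saturation
-- connectivity check over the deduplicated chosen cells (objective: alternative,
-- no speed claim). Equivalence is about the return value; neither version
-- mutates its arguments.

-- ===== PORT A =====

-- student[x][y] with Python indexing (Pre_ keeps the indices in range, so the defaults are never the result)
def aCellStr (student : List (List String)) (x y : Int) : String :=
  PySem.List.pyGetD (PySem.List.pyGetD student x []) y ""

def get_S_cnt (student : List (List String)) (test_case : List (Int × Int)) : Int :=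
  test_case.foldl (fun acc p => if aCellStr student p.1 p.2 == "S" then acc + 1 else acc) 0

-- area[x][y] read / write (Python list indexing; total via the PySem D-forms)
def gget (a : List (List Bool)) (x y : Int) : Bool :=
  PySem.List.pyGetD (PySem.List.pyGetD a x []) y false

def gset (a : List (List Bool)) (x y : Int) (v : Bool) : List (List Bool) :=
  PySem.List.pySetD a x (PySem.List.pySetD (PySem.List.pyGetD a x []) y v)

def dxA : List Int := [0, 1, 0, -1]
def dyA : List Int := [1, 0, -1, 0]

-- body of 'for i in range(4)': state = (area, queue after the popleft)
def bfsStep (vx vy : Int) (st : List (List Bool) × List (Int × Int)) (i : Int) :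
    List (List Bool) × List (Int × Int) :=
  let nx := vx + PySem.List.pyGetD dxA i 0
  let ny := vy + PySem.List.pyGetD dyA i 0
  if nx < 0 ∨ ny < 0 ∨ 5 ≤ nx ∨ 5 ≤ ny ∨ gget st.1 nx ny == false then st
  else (gset st.1 nx ny false, st.2 ++ [(nx, ny)])

-- 'while queue': fuel only makes the recursion structural; 26 dequeues always
-- suffice, since each enqueue clears one of the ≤ 25 true cells of the 5x5 grid
def bfsLoop : Nat → List (List Bool) × List (Int × Int) → List (List Bool)
  | _, (a, []) => a
  | 0, (a, _ :: _) => a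
  | fuel + 1, (a, v :: q) =>
      bfsLoop fuel ((PySem.List.pyRange 0 4 1).foldl (bfsStep v.1 v.2) (a, q))

def bfs (a : List (List Bool)) (start : Int × Int) : List (List Bool) :=
  bfsLoop 26 (gset a start.1 start.2 false, [start])

def solution (student : List (List String)) (test_case : List (Int × Int)) : Int :=
  if get_S_cnt student test_case ≤ 3 then 0
  else
    let area0 := List.replicate 5 (List.replicate 5 false)
    let area1 := test_case.foldl (fun a p => gset a p.1 p.2 true) area0
    let area2 := bfs area1 (PySem.List.pyGetD test_case 0 (0, 0))
    if test_case.any (fun p => gget area2 p.1 p.2 == true) then 0 else 1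

-- ===== PORT B =====

def bDirs : List (Int × Int) := [(0, 1), (1, 0), (0, -1), (-1, 0)]

-- one saturation pass: absorb every not-yet-reached cell adjacent to the reached set
def bPass (cells r : List (Int × Int)) : List (Int × Int) :=
  r ++ cells.filter (fun c =>
    !r.contains c && bDirs.any (fun d => r.contains (c.1 + d.1, c.2 + d.2)))

def solution_alt (student : List (List String)) (test_case : List (Int × Int)) : Int :=
  let s_cnt : Int := test_case.foldl
    (fun acc p => if PySem.List.pyGetD (PySem.List.pyGetD student p.1 []) p.2 "" == "S" then acc + 1 else acc) 0
  if s_cnt ≤ 3 then 0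
  else
    let cells := PySem.List.dedup test_case
    let reached := (List.range cells.length).foldl
      (fun r _ => bPass cells r) [PySem.List.pyGetD cells 0 (0, 0)]
    if reached.length == cells.length then 1 else 0

-- ===== PRECONDITION & SPEC =====
-- Pre_ excludes inputs where looking a chosen cell up in student would raise
-- IndexError, and — when more than three chosen cells hold "S", so A's grid
-- phase actually runs — inputs with a coordinate outside [0,5), where A's value
-- silently relies on Python's negative-index wraparound into the 5x5 grid, an
-- artefact of A's list indexing.
def Pre_solution (student : List (List String)) (test_case : List (Int × Int)) : Prop :=
  (∀ p ∈ test_case, PySem.Raise.InRange student.length p.1 ∧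
      PySem.Raise.InRange (PySem.List.pyGetD student p.1 []).length p.2) ∧
  (test_case.countP
      (fun p => PySem.List.pyGetD (PySem.List.pyGetD student p.1 []) p.2 "" == "S") ≤ 3 ∨
    ∀ p ∈ test_case, 0 ≤ p.1 ∧ p.1 < 5 ∧ 0 ≤ p.2 ∧ p.2 < 5)
instance (student : List (List String)) (test_case : List (Int × Int)) : Decidable (Pre_solution student test_case) := by unfold Pre_solution; infer_instance

def pvWitness_solution : List (List String) × (List (Int × Int)) :=
  ([["S", "S"], ["S", "S"]], [(0, 0), (0, 1), (1, 0), (1, 1)])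

def Spec_solution (student : List (List String)) (test_case : List (Int × Int)) (out : Int) : Prop := out = solution_alt student test_case
instance (student : List (List String)) (test_case : List (Int × Int)) (out : Int) : Decidable (Spec_solution student test_case out) := by unfold Spec_solution; infer_instance

-- ===== CLAIM (what is proved, stated in full; the proofs are below) =====
def Claim_equal_solution : Prop := ∀ (student : List (List String)) (test_case : List (Int × Int)), Dom_solution student test_case → Pre_solution student test_case → Spec_solution student test_case (solution student test_case)

-- ===== LEMMAS AND PROOFS =====

lemma pyGetD_nonneg' {α : Type} (xs : List α) (i : Int) (d : α) (h : 0 ≤ i) :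
    PySem.List.pyGetD xs i d = xs.getD i.toNat d := by
  rw [← Int.toNat_of_nonneg h, PySem.List.pyGetD_natCast]
  rw [Int.toNat_natCast]

lemma gget_eq (a : List (List Bool)) (x y : Int) (hx : 0 ≤ x) (hy : 0 ≤ y) :
    gget a x y = (a.getD x.toNat []).getD y.toNat false := by
  rw [gget, pyGetD_nonneg' _ _ _ hx, pyGetD_nonneg' _ _ _ hy]

lemma gset_eq (a : List (List Bool)) (x y : Int) (v : Bool) (hx : 0 ≤ x) (hy : 0 ≤ y) :
    gset a x y v = a.set x.toNat ((a.getD x.toNat []).set y.toNat v) := by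
  rw [gset, PySem.List.pySetD_of_nonneg _ _ hx, PySem.List.pySetD_of_nonneg _ _ hy,
      pyGetD_nonneg' _ _ _ hx]

def inR (c : Int × Int) : Prop := 0 ≤ c.1 ∧ c.1 < 5 ∧ 0 ≤ c.2 ∧ c.2 < 5
def Tcell (a : List (List Bool)) (c : Int × Int) : Prop := inR c ∧ gget a c.1 c.2 = true
def Sh (a : List (List Bool)) : Prop := a.length = 5 ∧ ∀ r ∈ a, r.length = 5
def sumTrue (a : List (List Bool)) : Nat := (a.map (fun r => r.count true)).sum

lemma Sh_gset (a : List (List Bool)) (x y : Int) (v : Bool) (hSh : Sh a)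
    (hp : inR (x, y)) : Sh (gset a x y v) := by
  obtain ⟨hx, hx5, hy, hy5⟩ := hp
  rw [gset_eq a x y v hx hy]
  obtain ⟨h1, h2⟩ := hSh
  refine ⟨by simpa using h1, ?_⟩
  intro r hr
  rcases List.mem_or_eq_of_mem_set hr with h | h
  · exact h2 r h
  · subst h
    rw [List.length_set]
    by_cases hlt : x.toNat < a.length
    · rw [List.getD_eq_getElem _ _ hlt]
      exact h2 _ (List.getElem_mem hlt)
    · exfalso
      rw [h1] at hlt
      omega

lemma gget_gset (a : List (List Bool)) (p c : Int × Int) (v : Bool) (hSh : Sh a)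
    (hp : inR p) (hc : inR c) :
    gget (gset a p.1 p.2 v) c.1 c.2 = if c = p then v else gget a c.1 c.2 := by
  obtain ⟨hpx, hpx5, hpy, hpy5⟩ := hp
  obtain ⟨hcx, hcx5, hcy, hcy5⟩ := hc
  obtain ⟨h1, h2⟩ := hSh
  have hpi : p.1.toNat < a.length := by omega
  have hci : c.1.toNat < a.length := by omega
  rw [gset_eq a p.1 p.2 v hpx hpy, gget_eq _ _ _ hcx hcy, gget_eq _ _ _ hcx hcy]
  have hrowp : (a.getD p.1.toNat []).length = 5 := by
    rw [List.getD_eq_getElem _ _ hpi]; exact h2 _ (List.getElem_mem hpi)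
  by_cases hx : c.1.toNat = p.1.toNat
  · rw [hx]
    have : (a.set p.1.toNat ((a.getD p.1.toNat []).set p.2.toNat v)).getD p.1.toNat [] =
        (a.getD p.1.toNat []).set p.2.toNat v := by
      rw [List.getD_eq_getElem?_getD, List.getElem?_set_self hpi]
      rfl
    rw [this]
    by_cases hy : c.2.toNat = p.2.toNat
    · have hpj : p.2.toNat < (a.getD p.1.toNat []).length := by omega
      rw [hy]
      have hcp : c = p := by
        have : c.1 = p.1 := by omega
        have : c.2 = p.2 := by omega
        exact Prod.ext (by omega) (by omega)
      rw [if_pos hcp, List.getD_eq_getElem?_getD, List.getElem?_set_self hpj]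
      rfl
    · have hcp : ¬ c = p := by
        intro h; subst h; omega
      rw [if_neg hcp, List.getD_eq_getElem?_getD, List.getElem?_set_ne (by omega),
          ← List.getD_eq_getElem?_getD]
  · have hcp : ¬ c = p := by
      intro h; subst h; omega
    rw [if_neg hcp]
    have : (a.set p.1.toNat ((a.getD p.1.toNat []).set p.2.toNat v)).getD c.1.toNat [] =
        a.getD c.1.toNat [] := by
      rw [List.getD_eq_getElem?_getD, List.getElem?_set_ne (by omega), ← List.getD_eq_getElem?_getD]
    rw [this]

lemma Tcell_gset_true (a : List (List Bool)) (p : Int × Int) (hSh : Sh a) (hp : inR p) (c : Int × Int) :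
    Tcell (gset a p.1 p.2 true) c ↔ (Tcell a c ∨ c = p) := by
  by_cases hc : inR c
  · rw [Tcell, Tcell, gget_gset a p c true hSh hp hc]
    by_cases hcp : c = p
    · simp [hcp, hp]
    · simp [hcp, hc]
  · constructor
    · intro h; exact absurd h.1 hc
    · intro h
      rcases h with h | h
      · exact absurd h.1 hc
      · subst h; exact absurd hp hc

lemma Tcell_gset_false (a : List (List Bool)) (p : Int × Int) (hSh : Sh a) (hp : inR p) (c : Int × Int) :
    Tcell (gset a p.1 p.2 false) c ↔ (Tcell a c ∧ c ≠ p) := by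
  by_cases hc : inR c
  · rw [Tcell, Tcell, gget_gset a p c false hSh hp hc]
    by_cases hcp : c = p
    · simp [hcp]
    · simp [hcp, hc]
  · constructor
    · intro h; exact absurd h.1 hc
    · intro h; exact absurd h.1.1 hc

lemma sum_set_nat (l : List Nat) (i : Nat) (v : Nat) (h : i < l.length) :
    (l.set i v).sum + l[i] = l.sum + v := by
  induction l generalizing i with
  | nil => simp at h
  | cons x xs ih =>
    cases i with
    | zero => simp [List.set]; omega
    | succ n =>
      simp only [List.set, List.sum_cons, List.getElem_cons_succ]
      have := ih n (by simpa using h)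
      omega

lemma count_set_false (r : List Bool) (j : Nat) (h : j < r.length) (ht : r[j] = true) :
    (r.set j false).count true + 1 = r.count true := by
  induction r generalizing j with
  | nil => simp at h
  | cons x xs ih =>
    cases j with
    | zero =>
      simp only [List.getElem_cons_zero] at ht
      subst ht
      simp [List.set]
    | succ n =>
      simp only [List.getElem_cons_succ] at ht
      have := ih n (by simpa using h) ht
      simp only [List.set, List.count_cons]
      by_cases hx : x = true <;> simp [hx] <;> omega

lemma sumTrue_gset_false (a : List (List Bool)) (p : Int × Int) (hSh : Sh a) (hp : inR p)
    (ht : gget a p.1 p.2 = true) : sumTrue (gset a p.1 p.2 false) + 1 = sumTrue a := by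
  obtain ⟨hpx, hpx5, hpy, hpy5⟩ := hp
  obtain ⟨h1, h2⟩ := hSh
  have hpi : p.1.toNat < a.length := by omega
  have hrow : (a.getD p.1.toNat []).length = 5 := by
    rw [List.getD_eq_getElem _ _ hpi]; exact h2 _ (List.getElem_mem hpi)
  have hpj : p.2.toNat < (a.getD p.1.toNat []).length := by omega
  rw [gget_eq _ _ _ hpx hpy, List.getD_eq_getElem _ _ hpj] at ht
  rw [gset_eq _ _ _ _ hpx hpy, sumTrue, List.map_set, sumTrue]
  have hmap : p.1.toNat < (a.map (fun r => r.count true)).length := by simpa using hpi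
  have := sum_set_nat (a.map (fun r => r.count true)) p.1.toNat
      (((a.getD p.1.toNat []).set p.2.toNat false).count true) hmap
  have hget : (a.map (fun r => r.count true))[p.1.toNat] = (a.getD p.1.toNat []).count true := by
    rw [List.getElem_map, List.getD_eq_getElem _ _ hpi]
  rw [hget] at this
  have hcnt := count_set_false (a.getD p.1.toNat []) p.2.toNat hpj ht
  omega

lemma sumTrue_le (a : List (List Bool)) (hSh : Sh a) : sumTrue a ≤ 25 := by
  obtain ⟨h1, h2⟩ := hSh
  have : ∀ x ∈ a.map (fun r => r.count true), x ≤ 5 := by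
    intro x hx
    obtain ⟨r, hr, rfl⟩ := List.mem_map.mp hx
    calc r.count true ≤ r.length := List.count_le_length
    _ = 5 := h2 r hr
  have := List.sum_le_card_nsmul _ 5 this
  simp only [List.length_map, h1, smul_eq_mul] at this
  unfold sumTrue
  omega

lemma Sh_empty : Sh (List.replicate 5 (List.replicate 5 false)) := by
  refine ⟨rfl, fun r hr => ?_⟩
  rw [List.eq_of_mem_replicate hr, List.length_replicate]

lemma Tcell_empty (c : Int × Int) : ¬ Tcell (List.replicate 5 (List.replicate 5 false)) c := by
  rintro ⟨⟨hx, hx5, hy, hy5⟩, hg⟩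
  rw [gget_eq _ _ _ hx hy] at hg
  have hrow : (List.replicate 5 (List.replicate 5 false)).getD c.1.toNat [] = List.replicate 5 false ∨
      (List.replicate 5 (List.replicate 5 false)).getD c.1.toNat [] = [] := by
    by_cases h : c.1.toNat < (List.replicate 5 (List.replicate (5:Nat) false)).length
    · exact Or.inl (by rw [List.getD_eq_getElem _ _ h]; exact List.eq_of_mem_replicate (List.getElem_mem h))
    · exact Or.inr (by rw [List.getD_eq_default _ _ (by omega)])
  rcases hrow with h | h <;> rw [h] at hg
  · by_cases h2 : c.2.toNat < (List.replicate (5:Nat) false).length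
    · rw [List.getD_eq_getElem _ _ h2, List.getElem_replicate] at hg
      exact absurd hg (by simp)
    · rw [List.getD_eq_default _ _ (by omega)] at hg
      exact absurd hg (by simp)
  · rw [List.getD_eq_default _ _ (by simp)] at hg
    exact absurd hg (by simp)

lemma paint_spec (l : List (Int × Int)) (hl : ∀ p ∈ l, inR p) :
    ∀ a : List (List Bool), Sh a →
      Sh (l.foldl (fun a p => gset a p.1 p.2 true) a) ∧
      ∀ c, Tcell (l.foldl (fun a p => gset a p.1 p.2 true) a) c ↔ (Tcell a c ∨ c ∈ l) := by
  induction l with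
  | nil => intro a hSh; exact ⟨hSh, fun c => by simp⟩
  | cons p ps ih =>
    intro a hSh
    have hp : inR p := hl p (by simp)
    have hSh' : Sh (gset a p.1 p.2 true) := Sh_gset a p.1 p.2 true hSh ⟨hp.1, hp.2.1, hp.2.2.1, hp.2.2.2⟩
    obtain ⟨ih1, ih2⟩ := ih (fun q hq => hl q (by simp [hq])) (gset a p.1 p.2 true) hSh'
    refine ⟨ih1, fun c => ?_⟩
    rw [List.foldl_cons] at *
    rw [ih2 c, Tcell_gset_true a p hSh hp c]
    simp only [List.mem_cons]
    tauto


def dirOf (i : Int) : Int × Int := (PySem.List.pyGetD dxA i 0, PySem.List.pyGetD dyA i 0)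

def nOf (v : Int × Int) (i : Int) : Int × Int := (v.1 + (dirOf i).1, v.2 + (dirOf i).2)

lemma nOf_fst (v : Int × Int) (i : Int) : (nOf v i).1 = v.1 + PySem.List.pyGetD dxA i 0 := rfl
lemma nOf_snd (v : Int × Int) (i : Int) : (nOf v i).2 = v.2 + PySem.List.pyGetD dyA i 0 := rfl

lemma bfsStep_skip (v : Int × Int) (st : List (List Bool) × List (Int × Int)) (i : Int)
    (h : ¬ Tcell st.1 (nOf v i)) : bfsStep v.1 v.2 st i = st := by
  simp only [bfsStep]
  split
  · rfl
  · exfalso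
    rename_i hng
    push Not at hng
    obtain ⟨h1, h2, h3, h4, h5⟩ := hng
    refine h ⟨⟨?_, ?_, ?_, ?_⟩, ?_⟩
    · rw [nOf_fst]; omega
    · rw [nOf_fst]; omega
    · rw [nOf_snd]; omega
    · rw [nOf_snd]; omega
    · rw [Tcell] at h
      simp only [nOf_fst, nOf_snd]
      simpa using h5

lemma bfsStep_clear (v : Int × Int) (st : List (List Bool) × List (Int × Int)) (i : Int)
    (h : Tcell st.1 (nOf v i)) :
    bfsStep v.1 v.2 st i = (gset st.1 (nOf v i).1 (nOf v i).2 false, st.2 ++ [nOf v i]) := by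
  obtain ⟨⟨h1, h2, h3, h4⟩, h5⟩ := h
  rw [nOf_fst] at h1 h2
  rw [nOf_snd] at h3 h4
  have h5' : gget st.1 (v.1 + PySem.List.pyGetD dxA i 0) (v.2 + PySem.List.pyGetD dyA i 0) = true := by
    simpa only [nOf_fst, nOf_snd] using h5
  simp only [bfsStep]
  split
  · exfalso
    rename_i hg
    rcases hg with h | h | h | h | h
    · omega
    · omega
    · omega
    · omega
    · simp [h5'] at h
  · have : nOf v i = (v.1 + PySem.List.pyGetD dxA i 0, v.2 + PySem.List.pyGetD dyA i 0) := rfl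
    rw [this]

lemma fold_step_spec (v : Int × Int) :
    ∀ (ds : List Int) (st : List (List Bool) × List (Int × Int)), Sh st.1 →
    (∀ i ∈ ds, dirOf i ∈ bDirs) →
    ∃ new : List (Int × Int),
      (ds.foldl (bfsStep v.1 v.2) st).2 = st.2 ++ new ∧
      Sh (ds.foldl (bfsStep v.1 v.2) st).1 ∧
      (∀ c ∈ new, Tcell st.1 c ∧ ∃ d ∈ bDirs, (v.1 + d.1, v.2 + d.2) = c) ∧
      (∀ c, Tcell (ds.foldl (bfsStep v.1 v.2) st).1 c ↔ (Tcell st.1 c ∧ c ∉ new)) ∧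
      sumTrue (ds.foldl (bfsStep v.1 v.2) st).1 + new.length = sumTrue st.1 ∧
      (∀ i ∈ ds, ¬ Tcell (ds.foldl (bfsStep v.1 v.2) st).1 (nOf v i)) := by
  intro ds
  induction ds with
  | nil =>
    intro st hSh _
    exact ⟨[], by simp, hSh, by simp, fun c => by simp, by simp, by simp⟩
  | cons i ds ih =>
    intro st hSh hds
    have hdi : dirOf i ∈ bDirs := hds i (by simp)
    have hds' : ∀ j ∈ ds, dirOf j ∈ bDirs := fun j hj => hds j (by simp [hj])
    by_cases hT : Tcell st.1 (nOf v i)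
    · -- clear case
      rw [List.foldl_cons, bfsStep_clear v st i hT]
      have hinR : inR (nOf v i) := hT.1
      have hSh1 : Sh (gset st.1 (nOf v i).1 (nOf v i).2 false) :=
        Sh_gset _ _ _ _ hSh ⟨hinR.1, hinR.2.1, hinR.2.2.1, hinR.2.2.2⟩
      obtain ⟨new', e1, e2, e3, e4, e5, e6⟩ :=
        ih (gset st.1 (nOf v i).1 (nOf v i).2 false, st.2 ++ [nOf v i]) hSh1 hds'
      have hT1 : ∀ c, Tcell (gset st.1 (nOf v i).1 (nOf v i).2 false) c ↔ (Tcell st.1 c ∧ c ≠ nOf v i) := by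
        intro c
        have := Tcell_gset_false st.1 (nOf v i) hSh hinR c
        simpa using this
      refine ⟨nOf v i :: new', ?_, e2, ?_, ?_, ?_, ?_⟩
      · rw [e1]; simp
      · intro c hc
        rcases List.mem_cons.mp hc with h | h
        · subst h
          refine ⟨hT, ?_⟩
          exact ⟨dirOf i, hdi, rfl⟩
        · obtain ⟨hTc, hd⟩ := e3 c h
          exact ⟨((hT1 c).mp hTc).1, hd⟩
      · intro c
        rw [e4 c, hT1 c]
        simp only [List.mem_cons]
        tauto
      · have hsum := sumTrue_gset_false st.1 (nOf v i) hSh hinR (by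
          have := hT.2
          exact this)
        have e5' : sumTrue (ds.foldl (bfsStep v.1 v.2)
            (gset st.1 (nOf v i).1 (nOf v i).2 false, st.2 ++ [nOf v i])).1 + new'.length =
            sumTrue (gset st.1 (nOf v i).1 (nOf v i).2 false) := e5
        simp only [List.length_cons]
        omega
      · intro j hj
        rcases List.mem_cons.mp hj with h | h
        · subst h
          rw [e4]
          intro hcon
          exact ((hT1 _).mp hcon.1).2 rfl
        · exact e6 j h
    · -- skip case
      rw [List.foldl_cons, bfsStep_skip v st i hT]
      obtain ⟨new', e1, e2, e3, e4, e5, e6⟩ := ih st hSh hds'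
      refine ⟨new', e1, e2, e3, e4, e5, ?_⟩
      intro j hj
      rcases List.mem_cons.mp hj with h | h
      · subst h
        rw [e4]
        intro hcon
        exact hT hcon.1
      · exact e6 j h


def Nbr (tc : List (Int × Int)) (x y : Int × Int) : Prop :=
  y ∈ tc ∧ ∃ d ∈ bDirs, (x.1 + d.1, x.2 + d.2) = y

def Reach (tc : List (Int × Int)) (s c : Int × Int) : Prop :=
  Relation.ReflTransGen (Nbr tc) s c

lemma reach_le (tc : List (Int × Int)) (s : Int × Int) (X : Int × Int → Prop)
    (hs : X s) (hcl : ∀ a, X a → ∀ b, Nbr tc a b → X b) :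
    ∀ c, Reach tc s c → X c := by
  intro c h
  induction h with
  | refl => exact hs
  | tail _ h2 ih => exact hcl _ ih _ h2

lemma pyRange4 : PySem.List.pyRange 0 4 1 = [0, 1, 2, 3] := by decide

lemma dirOf_mem : ∀ i ∈ [(0:Int), 1, 2, 3], dirOf i ∈ bDirs := by decide

lemma dirs_covered (v : Int × Int) : ∀ d ∈ bDirs, ∃ i ∈ [(0:Int), 1, 2, 3], nOf v i = (v.1 + d.1, v.2 + d.2) := by
  intro d hd
  rcases (by simpa [bDirs] using hd : d = (0,1) ∨ d = (1,0) ∨ d = (0,-1) ∨ d = (-1,0)) with h | h | h | h <;>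
    subst h
  · exact ⟨0, by simp, rfl⟩
  · exact ⟨1, by simp, rfl⟩
  · exact ⟨2, by simp, rfl⟩
  · exact ⟨3, by simp, rfl⟩

lemma bDirs_symm : ∀ d ∈ bDirs, ∃ d' ∈ bDirs,
    ∀ c : Int × Int, ((c.1 + d.1) + d'.1, (c.2 + d.2) + d'.2) = c := by
  intro d hd
  rcases (by simpa [bDirs] using hd : d = (0,1) ∨ d = (1,0) ∨ d = (0,-1) ∨ d = (-1,0)) with h | h | h | h <;>
    subst h
  · exact ⟨(0, -1), by simp [bDirs], fun c => by simp⟩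
  · exact ⟨(-1, 0), by simp [bDirs], fun c => by simp⟩
  · exact ⟨(0, 1), by simp [bDirs], fun c => by simp⟩
  · exact ⟨(1, 0), by simp [bDirs], fun c => by simp⟩

lemma bfsLoop_spec (tc : List (Int × Int)) (s : Int × Int) (hs : s ∈ tc) :
    ∀ (fuel : Nat) (a : List (List Bool)) (q : List (Int × Int)),
    Sh a →
    (∀ c, Tcell a c → c ∈ tc) →
    (∀ c ∈ q, Reach tc s c ∧ ¬ Tcell a c) →
    (∀ c ∈ tc, ¬ Tcell a c → Reach tc s c) →
    (∀ c ∈ tc, ¬ Tcell a c → c ∉ q → ∀ d ∈ bDirs, ¬ Tcell a (c.1 + d.1, c.2 + d.2)) →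
    ¬ Tcell a s →
    q.length + sumTrue a ≤ fuel →
    ∀ c ∈ tc, (¬ Tcell (bfsLoop fuel (a, q)) c ↔ Reach tc s c) := by
  intro fuel
  induction fuel with
  | zero =>
    intro a q hSh hI1 hI2 hI3 hI4 hI5 hfuel
    have hq : q = [] := by
      cases q with
      | nil => rfl
      | cons v q' => simp at hfuel
    subst hq
    intro c hc
    constructor
    · exact fun h => hI3 c hc h
    · intro hr
      have := reach_le tc s (fun c => c ∈ tc ∧ ¬ Tcell (bfsLoop 0 (a, [])) c)
        ⟨hs, by simpa [bfsLoop] using hI5⟩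
        (fun x hx b hb => ⟨hb.1, by
          simp only [bfsLoop] at hx ⊢
          obtain ⟨d, hd, hdeq⟩ := hb.2
          have := hI4 x hx.1 hx.2 (by simp) d hd
          rw [hdeq] at this
          exact this⟩) c hr
      exact this.2
  | succ fuel ih =>
    intro a q hSh hI1 hI2 hI3 hI4 hI5 hfuel
    cases q with
    | nil =>
      -- same as fuel = 0 with empty queue
      intro c hc
      constructor
      · exact fun h => hI3 c hc h
      · intro hr
        have := reach_le tc s (fun c => c ∈ tc ∧ ¬ Tcell (bfsLoop (fuel+1) (a, [])) c)
          ⟨hs, by simpa [bfsLoop] using hI5⟩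
          (fun x hx b hb => ⟨hb.1, by
            simp only [bfsLoop] at hx ⊢
            obtain ⟨d, hd, hdeq⟩ := hb.2
            have := hI4 x hx.1 hx.2 (by simp) d hd
            rw [hdeq] at this
            exact this⟩) c hr
        exact this.2
    | cons v q' =>
      have hstep : bfsLoop (fuel+1) (a, v :: q') =
          bfsLoop fuel ((PySem.List.pyRange 0 4 1).foldl (bfsStep v.1 v.2) (a, q')) := rfl
      rw [hstep, pyRange4]
      obtain ⟨new, e1, e2, e3, e4, e5, e6⟩ :=
        fold_step_spec v [0, 1, 2, 3] (a, q') hSh dirOf_mem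
      set st' := ([(0:Int), 1, 2, 3].foldl (bfsStep v.1 v.2) (a, q')) with hst'
      have hv : Reach tc s v ∧ ¬ Tcell a v := hI2 v (by simp)
      have hnewR : ∀ c ∈ new, Reach tc s c ∧ c ∈ tc := by
        intro c hc
        obtain ⟨hTc, d, hd, hdeq⟩ := e3 c hc
        have hctc : c ∈ tc := hI1 c hTc
        exact ⟨Relation.ReflTransGen.tail hv.1 ⟨hctc, d, hd, hdeq⟩, hctc⟩
      have hq2 : st'.2 = q' ++ new := e1
      have hpair : st' = (st'.1, st'.2) := rfl
      have happly : bfsLoop fuel st' = bfsLoop fuel (st'.1, st'.2) := by rw [← hpair]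
      rw [happly, hq2]
      apply ih st'.1 (q' ++ new) e2
      · intro c hc
        exact hI1 c ((e4 c).mp hc).1
      · intro c hc
        rcases List.mem_append.mp hc with h | h
        · have := hI2 c (by simp [h])
          exact ⟨this.1, fun hT => this.2 ((e4 c).mp hT).1⟩
        · exact ⟨(hnewR c h).1, fun hT => ((e4 c).mp hT).2 h⟩
      · intro c hc hT
        by_cases hTa : Tcell a c
        · have hcnew : c ∈ new := by
            by_contra hno
            exact hT ((e4 c).mpr ⟨hTa, hno⟩)
          exact (hnewR c hcnew).1
        · exact hI3 c hc hTa
      · intro c hc hT hcq d hd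
        by_cases hcv : c = v
        · subst hcv
          obtain ⟨i, hi, hieq⟩ := dirs_covered (v := c) d hd
          rw [← hieq]
          exact e6 i hi
        · have hcq' : c ∉ v :: q' := by
            intro h
            rcases List.mem_cons.mp h with h | h
            · exact hcv h
            · exact hcq (by simp [h])
          have hTa : ¬ Tcell a c := by
            intro hTa
            have hcnew : c ∈ new := by
              by_contra hno
              exact hT ((e4 c).mpr ⟨hTa, hno⟩)
            exact hcq (by simp [hcnew])
          have := hI4 c hc hTa hcq' d hd
          intro hT'
          exact this ((e4 _).mp hT').1
      · intro hT
        exact hI5 ((e4 s).mp hT).1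
      · have e5' : sumTrue st'.1 + new.length = sumTrue a := e5
        simp only [List.length_append]
        simp only [List.length_cons] at hfuel
        omega


lemma solution_core (student : List (List String)) (t0 : Int × Int) (rest : List (Int × Int))
    (hinR : ∀ p ∈ t0 :: rest, inR p)
    (hcnt : ¬ get_S_cnt student (t0 :: rest) ≤ 3) :
    ∃ area2 : List (List Bool),
      solution student (t0 :: rest) =
        (if (t0 :: rest).any (fun p => gget area2 p.1 p.2 == true) then 0 else 1) ∧
      (∀ c ∈ t0 :: rest, ¬ Tcell area2 c ↔ Reach (t0 :: rest) t0 c) := by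
  have ht0 : inR t0 := hinR t0 (by simp)
  obtain ⟨hSh1, hpaint⟩ := paint_spec (t0 :: rest) hinR
    (List.replicate 5 (List.replicate 5 false)) Sh_empty
  set area1 := (t0 :: rest).foldl (fun a p => gset a p.1 p.2 true)
    (List.replicate 5 (List.replicate 5 false)) with harea1
  have hpaint' : ∀ c, Tcell area1 c ↔ c ∈ t0 :: rest := by
    intro c
    rw [hpaint c]
    constructor
    · rintro (h | h)
      · exact absurd h (Tcell_empty c)
      · exact h
    · exact Or.inr
  set a' := gset area1 t0.1 t0.2 false with ha'
  have hSh' : Sh a' := Sh_gset _ _ _ _ hSh1 ⟨ht0.1, ht0.2.1, ht0.2.2.1, ht0.2.2.2⟩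
  have hT' : ∀ c, Tcell a' c ↔ (c ∈ t0 :: rest ∧ c ≠ t0) := by
    intro c
    rw [ha', Tcell_gset_false area1 t0 hSh1 ht0 c, hpaint' c]
  refine ⟨bfs area1 t0, ?_, ?_⟩
  · show (if get_S_cnt student (t0 :: rest) ≤ 3 then (0:Int)
      else if (t0 :: rest).any (fun p => gget (bfs area1 (PySem.List.pyGetD (t0 :: rest) 0 (0, 0))) p.1 p.2 == true) then 0 else 1) =
      if (t0 :: rest).any (fun p => gget (bfs area1 t0) p.1 p.2 == true) then 0 else 1
    rw [if_neg hcnt, PySem.List.pyGetD_zero_cons]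
  · have hchar := bfsLoop_spec (t0 :: rest) t0 (by simp) 26 a' [t0] hSh'
      (fun c hc => ((hT' c).mp hc).1)
      (fun c hc => by
        rw [List.mem_singleton] at hc
        subst hc
        exact ⟨Relation.ReflTransGen.refl, fun h => ((hT' c).mp h).2 rfl⟩)
      (fun c hc hT => by
        by_cases h : c = t0
        · subst h; exact Relation.ReflTransGen.refl
        · exact absurd ((hT' c).mpr ⟨hc, h⟩) hT)
      (fun c hc hT hq => by
        exfalso
        by_cases h : c = t0
        · exact hq (by simp [h])
        · exact hT ((hT' c).mpr ⟨hc, h⟩))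
      (fun h => ((hT' t0).mp h).2 rfl)
      (by
        have := sumTrue_le a' hSh'
        simp only [List.length_singleton]
        omega)
    exact hchar

lemma solution_one (student : List (List String)) (t0 : Int × Int) (rest : List (Int × Int))
    (hinR : ∀ p ∈ t0 :: rest, inR p) (hcnt : ¬ get_S_cnt student (t0 :: rest) ≤ 3)
    (hall : ∀ c ∈ t0 :: rest, Reach (t0 :: rest) t0 c) :
    solution student (t0 :: rest) = 1 := by
  obtain ⟨area2, heq, hchar⟩ := solution_core student t0 rest hinR hcnt
  rw [heq, if_neg]
  rw [List.any_eq_true]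
  rintro ⟨p, hp, hg⟩
  have hTp : Tcell area2 p := ⟨hinR p hp, by simpa using hg⟩
  exact (hchar p hp).mpr (hall p hp) hTp

lemma solution_zero (student : List (List String)) (t0 : Int × Int) (rest : List (Int × Int))
    (hinR : ∀ p ∈ t0 :: rest, inR p) (hcnt : ¬ get_S_cnt student (t0 :: rest) ≤ 3)
    (hnot : ¬ ∀ c ∈ t0 :: rest, Reach (t0 :: rest) t0 c) :
    solution student (t0 :: rest) = 0 := by
  obtain ⟨area2, heq, hchar⟩ := solution_core student t0 rest hinR hcnt
  rw [heq, if_pos]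
  rw [List.any_eq_true]
  push Not at hnot
  obtain ⟨c, hc, hr⟩ := hnot
  refine ⟨c, hc, ?_⟩
  have : Tcell area2 c := by
    by_contra h
    exact hr ((hchar c hc).mp h)
  simpa using this.2


lemma foldl_add_prefix (l : List (Int × Int)) :
    ∀ s : List (Int × Int), ∃ t, l.foldl PySem.Set.add s = s ++ t := by
  induction l with
  | nil => exact fun s => ⟨[], by simp⟩
  | cons x xs ih =>
    intro s
    rw [List.foldl_cons]
    obtain ⟨t, ht⟩ := ih (PySem.Set.add s x)
    rw [ht, PySem.Set.add]
    by_cases h : PySem.Set.contains s x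
    · rw [if_pos h]; exact ⟨t, rfl⟩
    · rw [if_neg h]; exact ⟨x :: t, by simp⟩

lemma dedup_cons_head (x : Int × Int) (xs : List (Int × Int)) :
    ∃ t, PySem.List.dedup (x :: xs) = x :: t := by
  have h : PySem.List.dedup (x :: xs) = xs.foldl PySem.Set.add [x] := rfl
  obtain ⟨t, ht⟩ := foldl_add_prefix xs [x]
  exact ⟨t, by rw [h, ht]; rfl⟩

lemma mem_bPass_elim (cells r : List (Int × Int)) (c : Int × Int) (h : c ∈ bPass cells r) :
    c ∈ r ∨ (c ∈ cells ∧ c ∉ r ∧ ∃ d ∈ bDirs, (c.1 + d.1, c.2 + d.2) ∈ r) := by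
  rcases List.mem_append.mp h with h | h
  · exact Or.inl h
  · right
    obtain ⟨hc, hcond⟩ := List.mem_filter.mp h
    rw [Bool.and_eq_true, Bool.not_eq_true'] at hcond
    obtain ⟨h1, h2⟩ := hcond
    refine ⟨hc, fun hr => absurd (List.contains_iff_mem.mpr hr) (by rw [h1]; exact Bool.false_ne_true), ?_⟩
    obtain ⟨d, hd, hdc⟩ := List.any_eq_true.mp h2
    exact ⟨d, hd, List.contains_iff_mem.mp hdc⟩

lemma bPass_keep (cells r : List (Int × Int)) (c : Int × Int) (h : c ∈ r) : c ∈ bPass cells r :=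
  List.mem_append.mpr (Or.inl h)

def Wsat (tc cells : List (Int × Int)) (s : Int × Int) (r : List (Int × Int)) : Prop :=
  r.Nodup ∧ (∀ c ∈ r, c ∈ cells) ∧ (∀ c ∈ r, Reach tc s c) ∧ s ∈ r

lemma W_pass (tc cells : List (Int × Int)) (s : Int × Int)
    (hsub : ∀ c ∈ cells, c ∈ tc) (hnc : cells.Nodup) (r : List (Int × Int))
    (hW : Wsat tc cells s r) : Wsat tc cells s (bPass cells r) := by
  obtain ⟨hnr, hrc, hrR, hsr⟩ := hW
  refine ⟨?_, ?_, ?_, bPass_keep cells r s hsr⟩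
  · rw [bPass, List.nodup_append]
    refine ⟨hnr, List.Nodup.filter _ hnc, ?_⟩
    intro a ha b hb
    rintro rfl
    obtain ⟨_, hcond⟩ := List.mem_filter.mp hb
    rw [Bool.and_eq_true, Bool.not_eq_true'] at hcond
    exact absurd (List.contains_iff_mem.mpr ha) (by rw [hcond.1]; exact Bool.false_ne_true)
  · intro c hc
    rcases mem_bPass_elim cells r c hc with h | h
    · exact hrc c h
    · exact h.1
  · intro c hc
    rcases mem_bPass_elim cells r c hc with h | h
    · exact hrR c h
    · obtain ⟨hcc, hnotr, d, hd, hdr⟩ := h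
      obtain ⟨d', hd', hd'eq⟩ := bDirs_symm d hd
      refine Relation.ReflTransGen.tail (hrR _ hdr) ⟨hsub c hcc, d', hd', ?_⟩
      exact hd'eq c

lemma pass_fix_iter (cells r : List (Int × Int)) (h : bPass cells r = r) :
    ∀ m, (bPass cells)^[m] r = r := by
  intro m
  induction m with
  | zero => rfl
  | succ m ih => rw [Function.iterate_succ_apply', ih, h]

lemma nodup_length_le (r cells : List (Int × Int)) (hnr : r.Nodup) (hsub : ∀ c ∈ r, c ∈ cells) :
    r.length ≤ cells.length := by
  calc r.length = r.toFinset.card := (List.toFinset_card_of_nodup hnr).symm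
  _ ≤ cells.toFinset.card := Finset.card_le_card (fun a ha => by
      rw [List.mem_toFinset] at ha ⊢
      exact hsub a ha)
  _ ≤ cells.length := List.toFinset_card_le cells

lemma len_eq_iff (r cells : List (Int × Int)) (hnr : r.Nodup) (hnc : cells.Nodup)
    (hsub : ∀ c ∈ r, c ∈ cells) :
    (r.length = cells.length ↔ ∀ c ∈ cells, c ∈ r) := by
  constructor
  · intro hlen c hc
    have h1 : r.toFinset ⊆ cells.toFinset := fun a ha => by
      rw [List.mem_toFinset] at ha ⊢
      exact hsub a ha
    have h2 : cells.toFinset.card ≤ r.toFinset.card := by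
      rw [List.toFinset_card_of_nodup hnr, List.toFinset_card_of_nodup hnc]
      omega
    have := Finset.eq_of_subset_of_card_le h1 h2
    rw [← List.mem_toFinset, ← this, List.mem_toFinset] at hc
    exact hc
  · intro hall
    have h1 := nodup_length_le r cells hnr hsub
    have h2 := nodup_length_le cells r hnc hall
    omega

lemma sat_fixed (tc cells : List (Int × Int)) (s : Int × Int)
    (hsub : ∀ c ∈ cells, c ∈ tc) (hnc : cells.Nodup) (hs : s ∈ cells) :
    Wsat tc cells s ((bPass cells)^[cells.length] [s]) ∧
    bPass cells ((bPass cells)^[cells.length] [s]) = (bPass cells)^[cells.length] [s] := by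
  have hW0 : Wsat tc cells s [s] :=
    ⟨List.nodup_singleton s, fun c hc => by rw [List.mem_singleton] at hc; subst hc; exact hs,
     fun c hc => by rw [List.mem_singleton] at hc; subst hc; exact Relation.ReflTransGen.refl,
     by simp⟩
  have hWk : ∀ k, Wsat tc cells s ((bPass cells)^[k] [s]) := by
    intro k
    induction k with
    | zero => exact hW0
    | succ k ih => rw [Function.iterate_succ_apply']; exact W_pass tc cells s hsub hnc _ ih
  refine ⟨hWk _, ?_⟩
  have aux : ∀ k, (∃ j, j ≤ k ∧ bPass cells ((bPass cells)^[j] [s]) = (bPass cells)^[j] [s]) ∨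
      k + 1 ≤ ((bPass cells)^[k] [s]).length := by
    intro k
    induction k with
    | zero => right; simp
    | succ k ih =>
      rcases ih with ⟨j, hj, hfix⟩ | hlen
      · exact Or.inl ⟨j, by omega, hfix⟩
      · by_cases hfix : bPass cells ((bPass cells)^[k] [s]) = (bPass cells)^[k] [s]
        · exact Or.inl ⟨k, by omega, hfix⟩
        · right
          rw [Function.iterate_succ_apply']
          set X := (bPass cells)^[k] [s] with hX
          have : X.length < (bPass cells X).length := by
            rw [bPass, List.length_append]
            have hne : (cells.filter (fun c =>
                !X.contains c && bDirs.any (fun d => X.contains (c.1 + d.1, c.2 + d.2)))).length ≠ 0 := by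
              intro h0
              rw [List.length_eq_zero_iff] at h0
              exact hfix (by rw [bPass, h0, List.append_nil])
            omega
          omega
  rcases aux cells.length with ⟨j, hj, hfix⟩ | hlen
  · have : (bPass cells)^[cells.length] [s] = (bPass cells)^[j] [s] := by
      have hsplit : cells.length = (cells.length - j) + j := by omega
      rw [hsplit, Function.iterate_add_apply, pass_fix_iter _ _ hfix]
    rw [this, hfix]
  · exfalso
    obtain ⟨hnr, hrc, _, _⟩ := hWk cells.length
    have := nodup_length_le _ cells hnr hrc
    omega

lemma sat_closed (tc cells : List (Int × Int)) (s : Int × Int)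
    (hsup : ∀ c ∈ tc, c ∈ cells) (r : List (Int × Int))
    (hfix : bPass cells r = r) (hsr : s ∈ r) :
    ∀ c, Reach tc s c → c ∈ r := by
  apply reach_le tc s (fun c => c ∈ r) hsr
  intro a ha b hb
  obtain ⟨hbtc, d, hd, hdeq⟩ := hb
  by_cases hbr : b ∈ r
  · exact hbr
  · exfalso
    have hbc : b ∈ cells := hsup b hbtc
    obtain ⟨d', hd', hd'eq⟩ := bDirs_symm d hd
    have hnbr : (b.1 + d'.1, b.2 + d'.2) ∈ r := by
      have : (b.1 + d'.1, b.2 + d'.2) = a := by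
        rw [← hdeq]
        exact hd'eq a
      rw [this]
      exact ha
    have hcond : (!r.contains b && bDirs.any (fun d => r.contains (b.1 + d.1, b.2 + d.2))) = true := by
      rw [Bool.and_eq_true, Bool.not_eq_true', ← Bool.not_eq_true]
      refine ⟨by simpa using fun h => hbr (List.contains_iff_mem.mp h), ?_⟩
      exact List.any_eq_true.mpr ⟨d', hd', List.contains_iff_mem.mpr hnbr⟩
    have : b ∈ bPass cells r := List.mem_append.mpr (Or.inr (List.mem_filter.mpr ⟨hbc, hcond⟩))
    rw [hfix] at this
    exact hbr this

lemma foldl_range_iterate {α : Type} (f : α → α) (r0 : α) :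
    ∀ n, (List.range n).foldl (fun r _ => f r) r0 = f^[n] r0 := by
  intro n
  induction n with
  | zero => rfl
  | succ n ih => rw [List.range_succ, List.foldl_append, ih, Function.iterate_succ_apply']; rfl

lemma alt_core (student : List (List String)) (t0 : Int × Int) (rest : List (Int × Int))
    (hcnt : ¬ get_S_cnt student (t0 :: rest) ≤ 3) :
    ∃ cells reached : List (Int × Int),
      solution_alt student (t0 :: rest) = (if reached.length == cells.length then 1 else 0) ∧
      cells = PySem.List.dedup (t0 :: rest) ∧
      Wsat (t0 :: rest) cells t0 reached ∧
      bPass cells reached = reached := by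
  have hcnt' : ¬ ((t0 :: rest).foldl
      (fun acc p => if PySem.List.pyGetD (PySem.List.pyGetD student p.1 []) p.2 "" == "S" then acc + 1 else acc) (0:Int)) ≤ 3 := hcnt
  obtain ⟨t, ht⟩ := dedup_cons_head t0 rest
  set cells := PySem.List.dedup (t0 :: rest) with hcells
  have hstart : PySem.List.pyGetD cells 0 (0, 0) = t0 := by
    rw [ht, PySem.List.pyGetD_zero_cons]
  have hsub : ∀ c ∈ cells, c ∈ t0 :: rest := fun c hc => (PySem.List.mem_dedup _ _).mp hc
  have hnc : cells.Nodup := PySem.List.nodup_dedup _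
  have hs : t0 ∈ cells := by rw [ht]; simp
  obtain ⟨hW, hfix⟩ := sat_fixed (t0 :: rest) cells t0 hsub hnc hs
  refine ⟨cells, (bPass cells)^[cells.length] [t0], ?_, rfl, hW, hfix⟩
  show (if ((t0 :: rest).foldl
      (fun acc p => if PySem.List.pyGetD (PySem.List.pyGetD student p.1 []) p.2 "" == "S" then acc + 1 else acc) (0:Int)) ≤ 3 then (0:Int)
    else if ((List.range cells.length).foldl (fun r _ => bPass cells r)
        [PySem.List.pyGetD cells 0 (0, 0)]).length == cells.length then 1 else 0) = _
  rw [if_neg hcnt', hstart, foldl_range_iterate]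

lemma alt_one (student : List (List String)) (t0 : Int × Int) (rest : List (Int × Int))
    (hcnt : ¬ get_S_cnt student (t0 :: rest) ≤ 3)
    (hall : ∀ c ∈ t0 :: rest, Reach (t0 :: rest) t0 c) :
    solution_alt student (t0 :: rest) = 1 := by
  obtain ⟨cells, reached, heq, hcells, hW, hfix⟩ := alt_core student t0 rest hcnt
  obtain ⟨hnr, hrc, hrR, hsr⟩ := hW
  rw [heq, if_pos]
  rw [beq_iff_eq, len_eq_iff reached cells hnr (by rw [hcells]; exact PySem.List.nodup_dedup _) hrc]
  intro c hc
  have hctc : c ∈ t0 :: rest := by rw [hcells] at hc; exact (PySem.List.mem_dedup _ _).mp hc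
  exact sat_closed (t0 :: rest) cells t0
    (fun c hc => by rw [hcells]; exact (PySem.List.mem_dedup _ _).mpr hc) reached hfix hsr c (hall c hctc)

lemma alt_zero (student : List (List String)) (t0 : Int × Int) (rest : List (Int × Int))
    (hcnt : ¬ get_S_cnt student (t0 :: rest) ≤ 3)
    (hnot : ¬ ∀ c ∈ t0 :: rest, Reach (t0 :: rest) t0 c) :
    solution_alt student (t0 :: rest) = 0 := by
  obtain ⟨cells, reached, heq, hcells, hW, hfix⟩ := alt_core student t0 rest hcnt
  obtain ⟨hnr, hrc, hrR, hsr⟩ := hW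
  rw [heq, if_neg]
  rw [beq_iff_eq, len_eq_iff reached cells hnr (by rw [hcells]; exact PySem.List.nodup_dedup _) hrc]
  intro hall
  push Not at hnot
  obtain ⟨c, hc, hr⟩ := hnot
  have hcc : c ∈ cells := by rw [hcells]; exact (PySem.List.mem_dedup _ _).mpr hc
  exact hr (hrR c (hall c hcc))

lemma get_S_cnt_eq_countP (student : List (List String)) (test_case : List (Int × Int)) :
    get_S_cnt student test_case = (test_case.countP
      (fun p => PySem.List.pyGetD (PySem.List.pyGetD student p.1 []) p.2 "" == "S") : Int) := by
  have h := PySem.List.foldl_if_add_one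
    (fun p : Int × Int => PySem.List.pyGetD (PySem.List.pyGetD student p.1 []) p.2 "" == "S")
    test_case 0
  rw [get_S_cnt]
  rw [show (fun (acc : Int) (p : Int × Int) => if aCellStr student p.1 p.2 == "S" then acc + 1 else acc) =
      (fun (acc : Int) (p : Int × Int) =>
        if (fun p : Int × Int => PySem.List.pyGetD (PySem.List.pyGetD student p.1 []) p.2 "" == "S") p = true
        then acc + 1 else acc) from rfl]
  rw [h]
  omega

theorem final_equiv (student : List (List String)) (test_case : List (Int × Int))
    (hpre : (∀ p ∈ test_case, PySem.Raise.InRange student.length p.1 ∧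
        PySem.Raise.InRange (PySem.List.pyGetD student p.1 []).length p.2) ∧
      (test_case.countP
          (fun p => PySem.List.pyGetD (PySem.List.pyGetD student p.1 []) p.2 "" == "S") ≤ 3 ∨
        ∀ p ∈ test_case, 0 ≤ p.1 ∧ p.1 < 5 ∧ 0 ≤ p.2 ∧ p.2 < 5)) :
    solution student test_case = solution_alt student test_case := by
  by_cases hcnt : get_S_cnt student test_case ≤ 3
  · have h1 : solution student test_case = 0 := by
      rw [solution, if_pos hcnt]
    have hcnt' : (test_case.foldl
        (fun acc p => if PySem.List.pyGetD (PySem.List.pyGetD student p.1 []) p.2 "" == "S" then acc + 1 else acc) (0:Int)) ≤ 3 := hcnt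
    have h2 : solution_alt student test_case = 0 := by
      show (if (test_case.foldl
        (fun acc p => if PySem.List.pyGetD (PySem.List.pyGetD student p.1 []) p.2 "" == "S" then acc + 1 else acc) (0:Int)) ≤ 3 then (0:Int) else _) = 0
      rw [if_pos hcnt']
    rw [h1, h2]
  · cases test_case with
    | nil => exact absurd (by rw [get_S_cnt]; simp : get_S_cnt student ([] : List (Int × Int)) ≤ 3) hcnt
    | cons t0 rest =>
      have hinR : ∀ p ∈ t0 :: rest, inR p := by
        rcases hpre.2 with hle | hgrid
        · exfalso
          rw [get_S_cnt_eq_countP] at hcnt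
          exact hcnt (by exact_mod_cast hle)
        · intro p hp
          obtain ⟨h1, h2, h3, h4⟩ := hgrid p hp
          exact ⟨h1, h2, h3, h4⟩
      by_cases hall : ∀ c ∈ t0 :: rest, Reach (t0 :: rest) t0 c
      · rw [solution_one student t0 rest hinR hcnt hall, alt_one student t0 rest hcnt hall]
      · rw [solution_zero student t0 rest hinR hcnt hall, alt_zero student t0 rest hcnt hall]

-- ===== VERDICT (by name: the statement is the Claim_ definition above) =====
theorem solution_spec : Claim_equal_solution := by
  intro student test_case _ hpre
  show solution student test_case = solution_alt student test_case
  exact final_equiv student test_case hpre
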